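-- pv_equiv track=rewrite | github.com/FTdiscovery/KMNBox | DFS/CompactTablebase.py | pfriendly
-- ===== SOURCE A (Python) =====
-- def abssum(board): #sum of absolute values (how many moves have elapsed)
--     count = 0
--     for row in board:
--         for x in row:
--             count += abs(x)
--     return count
--
-- def clone(board): #returns clone
--     nboard = []
--     for row in board:
--         nboard.append([x for x in row])
--     return nboard
--
-- def flip(board): #*-1 to each entry
--     nboard = []
--     for row in board:
--         nboard.append([-1*x for x in row])
--     return nboard
--
-- def pfriendly(board): #turns {player to move: 1, other: -1} into {player 1: 1, player 2: 2}
--     if abssum(board)%2 == 0: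
--         xboard = clone(board)
--     else:
--         xboard = flip(board)
--     nboard = []
--     for row in xboard:
--         nboard.append([(3*x*x-x)//2 for x in row])
--     return nboard
-- ===== SOURCE B (Python) =====
-- def pfriendly(board):
--     # Single recursive traversal: builds BOTH candidate outputs (even-parity and
--     # odd-parity transforms) while accumulating the abs-sum, then selects one.
--     def go(rows):
--         if not rows:
--             return 0, [], []
--         p, es, os = go(rows[1:])
--         row = rows[0]
--         return (p + sum(abs(x) for x in row),
--                 [[(3 * x * x - x) // 2 for x in row]] + es,
--                 [[(3 * x * x + x) // 2 for x in row]] + os)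
--     p, es, os = go(board)
--     return es if p % 2 == 0 else os
-- ===== Notes on version B (the rewrite author's own statement) =====
-- stated objective: alternative
-- what changed: Replaces A's three staged passes (abssum, clone-or-flip, map) by one fused recursive traversal that speculatively builds both the even-parity and odd-parity transformed boards while accumulating the parity count, selecting one at the end.
import Mathlib
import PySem

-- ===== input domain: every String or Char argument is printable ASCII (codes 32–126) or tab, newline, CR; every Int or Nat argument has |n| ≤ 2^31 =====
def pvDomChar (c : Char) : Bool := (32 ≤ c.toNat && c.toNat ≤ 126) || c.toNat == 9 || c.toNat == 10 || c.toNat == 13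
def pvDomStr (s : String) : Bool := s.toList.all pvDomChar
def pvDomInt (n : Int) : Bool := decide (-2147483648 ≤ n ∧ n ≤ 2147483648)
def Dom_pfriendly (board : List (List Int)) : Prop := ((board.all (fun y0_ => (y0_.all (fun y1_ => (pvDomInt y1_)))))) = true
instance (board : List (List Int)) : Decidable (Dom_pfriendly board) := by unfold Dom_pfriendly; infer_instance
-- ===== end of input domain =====

-- B fuses A's three staged passes into one recursive traversal building both
-- candidate outputs plus the parity count, selecting at the end; objective: alternative.

-- ===== PORT A =====
def pvAbssum (board : List (List Int)) : Int :=
  board.foldl (fun count row => row.foldl (fun count x => count + |x|) count) 0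

def pvClone (board : List (List Int)) : List (List Int) :=
  board.map (fun row => row.map (fun x => x))

def pvFlip (board : List (List Int)) : List (List Int) :=
  board.map (fun row => row.map (fun x => -1 * x))

def pfriendly (board : List (List Int)) : List (List Int) :=
  let xboard := if PySem.Int.mod (pvAbssum board) 2 = 0 then pvClone board else pvFlip board
  xboard.map (fun row => row.map (fun x => PySem.Int.floordiv (3 * x * x - x) 2))

-- ===== PORT B =====
def pvGo : List (List Int) → Int × List (List Int) × List (List Int)
  | [] => (0, [], [])
  | row :: rest =>
      let r := pvGo rest
      (r.1 + (row.map (fun x => |x|)).sum,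
       (row.map (fun x => PySem.Int.floordiv (3 * x * x - x) 2)) :: r.2.1,
       (row.map (fun x => PySem.Int.floordiv (3 * x * x + x) 2)) :: r.2.2)

def pfriendly_alt (board : List (List Int)) : List (List Int) :=
  let r := pvGo board
  if PySem.Int.mod r.1 2 = 0 then r.2.1 else r.2.2

-- ===== PRECONDITION & SPEC =====
def Spec_pfriendly (board : List (List Int)) (out : List (List Int)) : Prop := out = pfriendly_alt board
instance (board : List (List Int)) (out : List (List Int)) : Decidable (Spec_pfriendly board out) := by unfold Spec_pfriendly; infer_instance

-- ===== CLAIM (what is proved, stated in full; the proofs are below) =====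
def Claim_equal_pfriendly : Prop := ∀ (board : List (List Int)), Dom_pfriendly board → Spec_pfriendly board (pfriendly board)

-- ===== LEMMAS AND PROOFS =====
lemma foldl_abs_sum (l : List Int) (c : Int) :
    l.foldl (fun count x => count + |x|) c = c + (l.map (fun x => |x|)).sum := by
  induction l generalizing c with
  | nil => simp
  | cons h t ih => simp [List.foldl, ih]; ring

lemma go_fst (board : List (List Int)) :
    (pvGo board).1 = pvAbssum board := by
  suffices h : ∀ c, board.foldl (fun count row => row.foldl (fun count x => count + |x|) count) c
      = c + (pvGo board).1 by
    simpa using (h 0).symm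
  induction board with
  | nil => intro c; simp [pvGo]
  | cons row rest ih =>
      intro c
      rw [List.foldl_cons, foldl_abs_sum, ih]
      simp [pvGo]; ring

lemma go_snd (board : List (List Int)) :
    (pvGo board).2.1 = board.map (fun row => row.map (fun x => PySem.Int.floordiv (3 * x * x - x) 2)) := by
  induction board with
  | nil => simp [pvGo]
  | cons row rest ih => simp [pvGo, ih]

lemma go_trd (board : List (List Int)) :
    (pvGo board).2.2 = (pvFlip board).map (fun row => row.map (fun x => PySem.Int.floordiv (3 * x * x - x) 2)) := by
  induction board with
  | nil => simp [pvGo, pvFlip]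
  | cons row rest ih =>
      simp [pvGo, pvFlip, ih]

theorem pfriendly_spec_aux (board : List (List Int)) :
    pfriendly board = pfriendly_alt board := by
  show (if PySem.Int.mod (pvAbssum board) 2 = 0 then pvClone board else pvFlip board).map
      (fun row => row.map (fun x => PySem.Int.floordiv (3 * x * x - x) 2))
    = if PySem.Int.mod (pvGo board).1 2 = 0 then (pvGo board).2.1 else (pvGo board).2.2
  rw [go_fst]
  split_ifs with h
  · rw [go_snd]; simp [pvClone]
  · rw [go_trd]

-- ===== VERDICT (by name: the statement is the Claim_ definition above) =====
theorem pfriendly_spec : Claim_equal_pfriendly := by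
  intro board _
  unfold Spec_pfriendly
  exact pfriendly_spec_aux board
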